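-- pv_equiv track=rewrite | github.com/romerocesar/fidi | arrays.py | bulbs
-- ===== SOURCE A (Python) =====
-- def bulbs(A):
--     ans = 0
--     curr = -1
--     for bulb in A:
--         if not bulb and not ans:
--             ans = 1
--             curr = 0
--         elif not bulb and curr != bulb:
--             ans += 1
--             curr = bulb
--         elif bulb and ans and bulb != curr:
--             ans += 1
--             curr = bulb
--     return ans
-- ===== SOURCE B (Python) =====
-- def bulbs(A):
--     # Divide and conquer: for a segment return (total run count, run count from
--     # the first 0 onward, whether it contains a 0); merge halves by gluing the
--     # boundary runs when the adjacent values are equal.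
--     def solve(seg):
--         if len(seg) == 1:
--             x = seg[0]
--             return (1, 1 if x == 0 else 0, x == 0)
--         m = len(seg) // 2
--         left, right = seg[:m], seg[m:]
--         tl, al, zl = solve(left)
--         tr, ar, zr = solve(right)
--         glue = 1 if left[-1] == right[0] else 0
--         t = tl + tr - glue
--         a = (al + tr - glue) if zl else ar
--         return (t, a, zl or zr)
--     if not A:
--         return 0
--     return solve(A)[1]
-- ===== Notes on version B (the rewrite author's own statement) =====
-- stated objective: alternative
-- what changed: Replaces A's single-pass ans/curr state machine with a divide-and-conquer: each half of the list reports (total run count, run count from the first 0 onward, whether it contains a 0), and halves are merged by gluing the two boundary runs when the adjacent values are equal.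
import Mathlib
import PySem

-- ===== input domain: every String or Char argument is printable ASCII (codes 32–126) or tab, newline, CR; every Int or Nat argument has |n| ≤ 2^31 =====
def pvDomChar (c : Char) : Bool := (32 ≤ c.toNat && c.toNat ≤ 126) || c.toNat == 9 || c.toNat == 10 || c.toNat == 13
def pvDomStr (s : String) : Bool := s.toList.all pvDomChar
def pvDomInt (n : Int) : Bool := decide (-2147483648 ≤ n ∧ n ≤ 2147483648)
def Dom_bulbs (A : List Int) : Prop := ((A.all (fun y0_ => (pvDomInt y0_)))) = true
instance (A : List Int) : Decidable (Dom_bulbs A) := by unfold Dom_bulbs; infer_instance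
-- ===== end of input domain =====

-- B replaces A's single-pass ans/curr state machine by a divide-and-conquer:
-- each half reports (total runs, runs from the first 0 onward, has a 0) and the
-- halves are merged by gluing the boundary runs; objective: alternative algorithm.

-- ===== PORT A =====
-- one iteration of A's for-loop over state (ans, curr)
def bulbsStep (st : Int × Int) (bulb : Int) : Int × Int :=
  if bulb = 0 ∧ st.1 = 0 then (1, 0)
  else if bulb = 0 ∧ st.2 ≠ bulb then (st.1 + 1, bulb)
  else if bulb ≠ 0 ∧ st.1 ≠ 0 ∧ bulb ≠ st.2 then (st.1 + 1, bulb)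
  else st

def bulbs (A : List Int) : Int := (A.foldl bulbsStep (0, -1)).1

-- ===== PORT B =====
-- Source B's inner 'solve': on a segment return (total run count, run count from the
-- first 0 onward, whether a 0 occurs).  Python's solve is only ever called on
-- nonempty segments; the [] branch is a totality guard, never reached.
-- seg[:m] / seg[m:] with 0 ≤ m ≤ len are exactly take/drop
-- (PySem.List.slice_to_natCast / slice_from_natCast); left[-1] / right[0] are pyGet?.
def bulbsSolve (seg : List Int) : Int × Int × Bool :=
  if h : seg.length < 2 then
    match seg with
    | [] => (0, 0, false)            -- unreachable totality guard
    | x :: _ => (1, if x = 0 then 1 else 0, x == 0)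
  else
    let m := seg.length / 2
    let left := seg.take m           -- seg[:m]
    let right := seg.drop m          -- seg[m:]
    let (tl, al, zl) := bulbsSolve left
    let (tr, ar, zr) := bulbsSolve right
    let glue : Int := if PySem.List.pyGet? left (-1) = PySem.List.pyGet? right 0 then 1 else 0
    (tl + tr - glue, if zl then al + tr - glue else ar, zl || zr)
termination_by seg.length
decreasing_by
  · simp only [List.length_take]; omega
  · simp only [List.length_drop]; omega

def bulbs_alt (A : List Int) : Int :=
  if A = [] then 0 else (bulbsSolve A).2.1

-- ===== PRECONDITION & SPEC =====
def Spec_bulbs (A : List Int) (out : Int) : Prop := out = bulbs_alt A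
instance (A : List Int) (out : Int) : Decidable (Spec_bulbs A out) := by unfold Spec_bulbs; infer_instance

-- ===== CLAIM (what is proved, stated in full; the proofs are below) =====
def Claim_equal_bulbs : Prop := ∀ (A : List Int), Dom_bulbs A → Spec_bulbs A (bulbs A)

-- ===== LEMMAS AND PROOFS =====

-- number of value changes in a list read after an initial value c
def pvTrans (c : Int) : List Int → Int
  | [] => 0
  | x :: xs => (if x ≠ c then 1 else 0) + pvTrans x xs

-- total number of maximal runs
def pvTruns : List Int → Int
  | [] => 0
  | x :: xs => 1 + pvTrans x xs

-- number of maximal runs from the first 0 onward (0 if there is no 0)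
def pvAz : List Int → Int
  | [] => 0
  | x :: xs => if x = 0 then 1 + pvTrans 0 xs else pvAz xs

-- does a 0 occur
def pvHz : List Int → Bool
  | [] => false
  | x :: xs => (x == 0) || pvHz xs

theorem pvStep_of_pos (ans curr x : Int) (h : 1 ≤ ans) :
    bulbsStep (ans, curr) x = (ans + (if x ≠ curr then 1 else 0), x) := by
  have h0 : ans ≠ 0 := by omega
  unfold bulbsStep
  by_cases hx : x = curr
  · subst hx
    simp [h0]
  · by_cases hz : x = 0
    · subst hz
      simp [h0, hx, Ne.symm hx]
    · simp [hz, h0, hx, Ne.symm hx]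

theorem pvFoldl_pos (l : List Int) : ∀ (ans curr : Int), 1 ≤ ans →
    (l.foldl bulbsStep (ans, curr)).1 = ans + pvTrans curr l := by
  induction l with
  | nil => intro ans curr h; simp [pvTrans]
  | cons x xs ih =>
    intro ans curr h
    rw [List.foldl_cons, pvStep_of_pos ans curr x h, pvTrans]
    by_cases hx : x = curr
    · subst hx
      simp only [ne_eq, not_true_eq_false, if_false, add_zero]
      rw [ih ans x h]; ring
    · simp only [ne_eq, hx, not_false_eq_true, if_true]
      rw [ih (ans + 1) x (by omega)]; ring

-- A's loop computes pvAz
theorem pvBulbs_eq_az (A : List Int) : bulbs A = pvAz A := by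
  induction A with
  | nil => simp [bulbs, pvAz]
  | cons x xs ih =>
    by_cases hx : x = 0
    · subst hx
      have hstep : bulbsStep (0, -1) 0 = (1, 0) := by simp [bulbsStep]
      simp only [bulbs, List.foldl_cons, hstep, pvAz, if_true]
      exact pvFoldl_pos xs 1 0 (by omega)
    · have hstep : bulbsStep (0, -1) x = (0, -1) := by simp [bulbsStep, hx]
      simp only [bulbs, List.foldl_cons, hstep, pvAz, hx, if_false]
      exact ih

theorem pvTrans_append (u : List Int) : ∀ (v : List Int) (c : Int),
    pvTrans c (u ++ v) = pvTrans c u + pvTrans (u.getLastD c) v := by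
  induction u with
  | nil => intro v c; simp [pvTrans]
  | cons x u' ih =>
    intro v c
    simp only [List.cons_append, pvTrans, List.getLastD_cons, ih v x]
    ring

theorem pvTrans_head (c : Int) (v : List Int) (hv : v ≠ []) :
    pvTrans c v = pvTruns v - (if v.headD 0 = c then 1 else 0) := by
  cases v with
  | nil => exact absurd rfl hv
  | cons y v' =>
    simp only [pvTrans, pvTruns, List.headD_cons]
    by_cases h : y = c <;> simp [h] <;> ring

theorem pvTruns_append (u v : List Int) (hu : u ≠ []) (hv : v ≠ []) :
    pvTruns (u ++ v) =
      pvTruns u + pvTruns v - (if u.getLastD 0 = v.headD 0 then 1 else 0) := by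
  cases u with
  | nil => exact absurd rfl hu
  | cons x u' =>
    cases v with
    | nil => exact absurd rfl hv
    | cons y v' =>
      have hL : (x :: u').getLastD 0 = u'.getLastD x := by
        cases u' with
        | nil => rfl
        | cons z zs => rw [List.getLastD_cons, List.getLastD_cons]
      rw [List.cons_append, hL]
      simp only [pvTruns, List.headD_cons]
      rw [pvTrans_append u' (y :: v') x]
      simp only [pvTrans]
      split_ifs with h1 h2 <;> simp_all <;> omega

theorem pvHz_append (u v : List Int) : pvHz (u ++ v) = (pvHz u || pvHz v) := by
  induction u with
  | nil => simp [pvHz]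
  | cons x u' ih => simp [pvHz, ih, Bool.or_assoc]

theorem pvAz_append (u v : List Int) (hu : u ≠ []) (hv : v ≠ []) :
    pvAz (u ++ v) =
      if pvHz u then pvAz u + pvTruns v - (if u.getLastD 0 = v.headD 0 then 1 else 0)
      else pvAz v := by
  induction u with
  | nil => exact absurd rfl hu
  | cons x u' ih =>
    by_cases hx : x = 0
    · subst hx
      have hz : pvHz (0 :: u') = true := by simp [pvHz]
      have hlast0 : ((0 :: u') : List Int).getLastD 0 = u'.getLastD 0 := by
        rw [List.getLastD_cons]
      have l1 : pvAz ((0 : Int) :: (u' ++ v)) = 1 + pvTrans 0 (u' ++ v) := by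
        simp [pvAz]
      have l2 : pvAz ((0 : Int) :: u') = 1 + pvTrans 0 u' := by simp [pvAz]
      rw [List.cons_append, l1, if_pos hz, l2, hlast0,
        pvTrans_append u' v 0, pvTrans_head (u'.getLastD 0) v hv]
      by_cases h : u'.getLastD 0 = v.headD 0
      · simp only [h, if_pos rfl]; ring
      · have h' : ¬ v.headD 0 = u'.getLastD 0 := fun e => h e.symm
        rw [if_neg h', if_neg h]; ring
    · cases u' with
      | nil =>
        have hzf : ¬ (pvHz [x] = true) := by simp [pvHz, hx]
        rw [if_neg hzf]
        simp [pvAz, hx]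
      | cons y u'' =>
        have h2 : (y :: u'' : List Int) ≠ [] := by simp
        have hhz : pvHz (x :: y :: u'') = pvHz (y :: u'') := by
          simp [pvHz, hx]
        have haz : pvAz (x :: y :: u'') = pvAz (y :: u'') := by
          simp only [pvAz, if_neg hx]
        have hlast : ((x :: y :: u'') : List Int).getLastD 0 = (y :: u'').getLastD 0 := by
          simp only [List.getLastD_cons]
        have hstep : pvAz (x :: ((y :: u'') ++ v)) = pvAz ((y :: u'') ++ v) := by
          simp only [pvAz, if_neg hx]
        rw [hhz, haz, hlast, List.cons_append, hstep, ih h2]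

-- left[-1] and right[0] as option lookups
theorem pvLast_opt (l : List Int) (hl : l ≠ []) :
    PySem.List.pyGet? l (-1) = some (l.getLastD 0) := by
  rw [PySem.List.pyGet?_neg_one]
  induction l with
  | nil => exact absurd rfl hl
  | cons x xs ih =>
    cases xs with
    | nil => rfl
    | cons y ys => simpa [List.getLast?_cons_cons, List.getLastD_cons] using ih (by simp)

theorem pvHead_opt (l : List Int) (hl : l ≠ []) :
    PySem.List.pyGet? l 0 = some (l.headD 0) := by
  cases l with
  | nil => exact absurd rfl hl
  | cons x xs => simp [PySem.List.pyGet?, PySem.List.pyIdx?, List.headD_cons]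

-- correctness of B's divide and conquer
theorem pvSolve_spec (seg : List Int) (hs : seg ≠ []) :
    bulbsSolve seg = (pvTruns seg, pvAz seg, pvHz seg) := by
  generalize hn : seg.length = n
  induction n using Nat.strong_induction_on generalizing seg with
  | _ n ih =>
  rw [bulbsSolve]
  by_cases h2 : seg.length < 2
  · rw [dif_pos h2]
    cases seg with
    | nil => exact absurd rfl hs
    | cons x xs =>
      have hxs : xs = [] := by
        cases xs with
        | nil => rfl
        | cons y ys => simp at h2
      subst hxs
      by_cases hx : x = 0 <;> simp [pvTruns, pvTrans, pvAz, pvHz, hx]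
  · rw [dif_neg h2]
    have hlen : 2 ≤ seg.length := by omega
    have hm1 : 1 ≤ seg.length / 2 := by omega
    have hm2 : seg.length / 2 < seg.length := by omega
    have hll : (seg.take (seg.length / 2)).length = seg.length / 2 := by
      simp [List.length_take]; omega
    have hrl : (seg.drop (seg.length / 2)).length = seg.length - seg.length / 2 := by
      simp [List.length_drop]
    have hleft : seg.take (seg.length / 2) ≠ [] := by
      apply List.ne_nil_of_length_pos; omega
    have hright : seg.drop (seg.length / 2) ≠ [] := by
      apply List.ne_nil_of_length_pos; omega
    have IHl := ih (seg.take (seg.length / 2)).length (by omega) _ hleft rfl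
    have IHr := ih (seg.drop (seg.length / 2)).length (by omega) _ hright rfl
    simp only [IHl, IHr, pvLast_opt _ hleft, pvHead_opt _ hright, Option.some.injEq]
    have hsplit : seg.take (seg.length / 2) ++ seg.drop (seg.length / 2) = seg :=
      List.take_append_drop _ seg
    have hT := pvTruns_append _ _ hleft hright
    have hA := pvAz_append _ _ hleft hright
    have hH := pvHz_append (seg.take (seg.length / 2)) (seg.drop (seg.length / 2))
    rw [hsplit] at hT hA hH
    refine Prod.ext ?_ (Prod.ext ?_ ?_)
    · simpa using hT.symm
    · simpa using hA.symm
    · simpa using hH.symm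

theorem pvMain (A : List Int) : bulbs A = bulbs_alt A := by
  rw [pvBulbs_eq_az]
  by_cases hA : A = []
  · subst hA; simp [bulbs_alt, pvAz]
  · rw [bulbs_alt, if_neg hA, pvSolve_spec A hA]

-- ===== VERDICT (by name: the statement is the Claim_ definition above) =====
theorem bulbs_spec : Claim_equal_bulbs := by
  intro A _
  unfold Spec_bulbs
  exact pvMain A
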